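-- pv_equiv track=rewrite | github.com/ZoolooS/stepik-practice | St67/St67_football_statistics.py | combine_stats
-- ===== SOURCE A (Python) =====
-- def combine_stats(plays, results, points):
--     stats = plays
--
--     for el in stats:
--         for result in results:
--             if el[0] == result[0]:
--                 el.extend(result[1:])
--
--     for el in stats:
--         for point in points:
--             if el[0] == point[0]:
--                 el.extend(point[1:])
--
--     return stats
-- ===== SOURCE B (Python) =====
-- def combine_stats(plays, results, points):
--     table = {}
--     for row in results:
--         table.setdefault(row[0], []).extend(row[1:])
--     for row in points:
--         table.setdefault(row[0], []).extend(row[1:])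
--     for el in plays:
--         el.extend(table.get(el[0], []))
--     return plays
-- ===== Notes on version B (the rewrite author's own statement) =====
-- stated objective: alternative
-- what changed: B replaces A's two nested plays-by-results and plays-by-points scans with one pass that builds a dict from key to its concatenated results-then-points extras, then a single pass over plays extending each element by one lookup.
-- outside the precondition, e.g. on combine_stats([[]], [], []): A returns [[]], B raises IndexError; on combine_stats([], [[]], []): A returns [], B raises IndexError
import Mathlib
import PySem

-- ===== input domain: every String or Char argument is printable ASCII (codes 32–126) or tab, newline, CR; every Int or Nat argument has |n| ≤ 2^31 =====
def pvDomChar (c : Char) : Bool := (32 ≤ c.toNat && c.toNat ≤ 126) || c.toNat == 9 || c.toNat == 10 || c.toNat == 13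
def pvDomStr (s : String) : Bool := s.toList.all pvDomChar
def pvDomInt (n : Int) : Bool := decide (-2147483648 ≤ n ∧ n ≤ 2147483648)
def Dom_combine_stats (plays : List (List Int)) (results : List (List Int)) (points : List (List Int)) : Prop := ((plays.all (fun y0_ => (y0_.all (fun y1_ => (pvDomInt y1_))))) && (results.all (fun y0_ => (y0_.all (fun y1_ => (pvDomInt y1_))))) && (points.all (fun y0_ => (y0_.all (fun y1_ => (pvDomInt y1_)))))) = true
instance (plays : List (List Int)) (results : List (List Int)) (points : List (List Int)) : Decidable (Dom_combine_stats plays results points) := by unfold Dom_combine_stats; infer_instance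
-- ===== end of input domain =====

-- B builds one key→extras lookup table instead of A's two nested scans;
-- both A and B extend plays' inner lists in place, the theorems are about the returned value.

-- ===== PORT A =====
-- one 'for el in stats: for x in others: if el[0] == x[0]: el.extend(x[1:])' pass
def pvPassA (stats : List (List Int)) (others : List (List Int)) : List (List Int) :=
  stats.map (fun el =>
    others.foldl (fun el x =>
      if PySem.List.pyGet? el 0 = PySem.List.pyGet? x 0
      then el ++ PySem.List.slice x (some 1) none else el) el)

def combine_stats (plays : List (List Int)) (results : List (List Int)) (points : List (List Int)) : List (List Int) :=
  let stats := plays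
  let stats := pvPassA stats results
  let stats := pvPassA stats points
  stats

-- ===== PORT B =====
-- 'table.setdefault(row[0], []).extend(row[1:])' over one list of rows
def pvBuild (t : PySem.Dict Int (List Int)) (rows : List (List Int)) : PySem.Dict Int (List Int) :=
  rows.foldl (fun t row =>
    t.modify (PySem.List.pyGetD row 0 0) [] (· ++ PySem.List.slice row (some 1) none)) t

def combine_stats_alt (plays : List (List Int)) (results : List (List Int)) (points : List (List Int)) : List (List Int) :=
  let table := pvBuild PySem.Dict.empty results
  let table := pvBuild table points
  plays.map (fun el => el ++ table.getD (PySem.List.pyGetD el 0 0) [])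

-- ===== PRECONDITION & SPEC =====
-- Pre_ excludes inputs containing an empty inner list: there A's lazy subscripting raises
-- IndexError on most of them and still returns on a few shapes (plays or both other lists empty),
-- while B's eager key accesses raise on all of them.
def Pre_combine_stats (plays : List (List Int)) (results : List (List Int)) (points : List (List Int)) : Prop :=
  [] ∉ plays ∧ [] ∉ results ∧ [] ∉ points
instance (plays : List (List Int)) (results : List (List Int)) (points : List (List Int)) : Decidable (Pre_combine_stats plays results points) := by unfold Pre_combine_stats; infer_instance

def pvWitness_combine_stats : List (List Int) × List (List Int) × List (List Int) :=
  ([[1, 5], [2, 6], [1, 7]], [[1, 10], [3, 11], [1, 12]], [[2, 20], [1, 21]])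

def Spec_combine_stats (plays : List (List Int)) (results : List (List Int)) (points : List (List Int)) (out : List (List Int)) : Prop := out = combine_stats_alt plays results points
instance (plays : List (List Int)) (results : List (List Int)) (points : List (List Int)) (out : List (List Int)) : Decidable (Spec_combine_stats plays results points out) := by unfold Spec_combine_stats; infer_instance

-- ===== CLAIM (what is proved, stated in full; the proofs are below) =====
def Claim_equal_combine_stats : Prop := ∀ (plays : List (List Int)) (results : List (List Int)) (points : List (List Int)), Dom_combine_stats plays results points → Pre_combine_stats plays results points → Spec_combine_stats plays results points (combine_stats plays results points)

-- ===== LEMMAS AND PROOFS =====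

-- the extras that key k collects from one list of rows
def pvExtras (rows : List (List Int)) (k : Int) : List Int :=
  (rows.filter (fun r => r.head? == some k)).flatMap (fun r => PySem.List.slice r (some 1) none)

lemma pvExtras_cons (r : List Int) (rows : List (List Int)) (k : Int) :
    pvExtras (r :: rows) k =
      (if r.head? == some k then PySem.List.slice r (some 1) none else []) ++ pvExtras rows k := by
  by_cases h : r.head? == some k <;> simp [pvExtras, h]

-- A's inner loop over one row list, for an accumulator with head k
lemma pvPassA_inner (rows : List (List Int)) (k : Int) :
    ∀ (acc : List Int), acc.head? = some k → [] ∉ rows →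
      rows.foldl (fun el x =>
        if PySem.List.pyGet? el 0 = PySem.List.pyGet? x 0
        then el ++ PySem.List.slice x (some 1) none else el) acc = acc ++ pvExtras rows k := by
  induction rows with
  | nil => intro acc _ _; simp [pvExtras]
  | cons r rows ih =>
    intro acc hacc hne
    have hr : r ≠ [] := by intro h; exact hne (by simp [h])
    have hrt : [] ∉ rows := fun h => hne (List.mem_cons_of_mem _ h)
    have hget : PySem.List.pyGet? acc 0 = some k := by
      simp [PySem.List.pyGet?_zero, ← List.head?_eq_getElem?, hacc]
    have hrget : PySem.List.pyGet? r 0 = r.head? := by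
      simp [PySem.List.pyGet?_zero, List.head?_eq_getElem?]
    simp only [List.foldl_cons]
    by_cases hc : r.head? = some k
    · have : PySem.List.pyGet? acc 0 = PySem.List.pyGet? r 0 := by rw [hget, hrget, hc]
      rw [if_pos this]
      have hacc' : (acc ++ PySem.List.slice r (some 1) none).head? = some k := by
        cases acc with
        | nil => simp at hacc
        | cons a as => simpa using hacc
      rw [ih _ hacc' hrt, pvExtras_cons]
      simp [hc]
    · have : ¬ PySem.List.pyGet? acc 0 = PySem.List.pyGet? r 0 := by
        rw [hget, hrget]; exact fun h => hc h.symm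
      rw [if_neg this, ih _ hacc hrt, pvExtras_cons]
      simp [hc]

-- B's table-building loop: what key c accumulates
lemma pvBuild_getD (rows : List (List Int)) :
    ∀ (t : PySem.Dict Int (List Int)) (c : Int), [] ∉ rows →
      (pvBuild t rows).getD c [] = t.getD c [] ++ pvExtras rows c := by
  induction rows with
  | nil => intro t c _; simp [pvBuild, pvExtras]
  | cons r rows ih =>
    intro t c hne
    have hr : r ≠ [] := by intro h; exact hne (by simp [h])
    have hrt : [] ∉ rows := fun h => hne (List.mem_cons_of_mem _ h)
    have hkey : PySem.List.pyGetD r 0 0 = r.headI := by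
      cases r with
      | nil => exact absurd rfl hr
      | cons a as => simp [PySem.List.pyGetD_zero_cons]
    simp only [pvBuild, List.foldl_cons]
    rw [show (rows.foldl (fun t row =>
        t.modify (PySem.List.pyGetD row 0 0) [] (· ++ PySem.List.slice row (some 1) none))
        (t.modify (PySem.List.pyGetD r 0 0) [] (· ++ PySem.List.slice r (some 1) none))) =
        pvBuild (t.modify (PySem.List.pyGetD r 0 0) [] (· ++ PySem.List.slice r (some 1) none)) rows from rfl]
    rw [ih _ c hrt, PySem.Dict.getD_modify, pvExtras_cons, hkey]
    have hhead : r.head? = some r.headI := by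
      cases r with
      | nil => exact absurd rfl hr
      | cons a as => simp
    by_cases hc : c = r.headI
    · rw [if_pos hc]
      simp [hhead, hc, List.append_assoc]
    · rw [if_neg hc]
      have : (r.head? == some c) = false := by
        simp [hhead]; exact fun h => hc h.symm
      simp [this]

lemma pvHead_of_ne_nil (el : List Int) (h : el ≠ []) : el.head? = some el.headI := by
  cases el with
  | nil => exact absurd rfl h
  | cons a as => simp

-- ===== VERDICT (by name: the statement is the Claim_ definition above) =====
theorem combine_stats_spec : Claim_equal_combine_stats := by
  intro plays results points _ hpre
  obtain ⟨hp, hr, hq⟩ := hpre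
  unfold Spec_combine_stats combine_stats combine_stats_alt
  simp only [pvPassA, List.map_map]
  apply List.map_congr_left
  intro el hel
  have hne : el ≠ [] := fun h => hp (h ▸ hel)
  have hhd : el.head? = some el.headI := pvHead_of_ne_nil el hne
  have hkey : PySem.List.pyGetD el 0 0 = el.headI := by
    cases el with
    | nil => exact absurd rfl hne
    | cons a as => simp [PySem.List.pyGetD_zero_cons]
  simp only [Function.comp]
  rw [pvPassA_inner results el.headI el hhd hr]
  have hhd2 : (el ++ pvExtras results el.headI).head? = some el.headI := by
    cases el with
    | nil => exact absurd rfl hne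
    | cons a as => simp
  rw [pvPassA_inner points el.headI _ hhd2 hq]
  rw [pvBuild_getD points _ _ hq, pvBuild_getD results _ _ hr]
  simp [hkey, List.append_assoc]
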